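-- pv_equiv track=rewrite | github.com/chang-yue/ctrl | tabular/test.py | get_nn_archis
-- ===== SOURCE A (Python) =====
-- import itertools
--
-- def get_nn_archis(
--     num_hidden_layer_list,  # list. candidate number of hidden layers
--     hidden_sizes_list,      # list of lists. each hidden layer has its candidate sizes
--     ):
--     num_hidden_layer_list.sort()
--     hidden_sizes_allComb = []
--     for num_hidden_layer in num_hidden_layer_list:
--         if num_hidden_layer<1: continue
--         if num_hidden_layer>len(hidden_sizes_list): break
--         hidden_sizes_allComb += list(itertools.product(*(hidden_sizes_list[:num_hidden_layer])))
--     return list(map(list, hidden_sizes_allComb))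
-- ===== SOURCE B (Python) =====
-- def get_nn_archis(
--     num_hidden_layer_list,  # list. candidate number of hidden layers
--     hidden_sizes_list,      # list of lists. each hidden layer has its candidate sizes
--     ):
--     # Incremental prefix-product pass: sorts in place like A, then extends one
--     # shared product depth-by-depth, reusing it across increasing layer counts.
--     num_hidden_layer_list.sort()
--     result = []
--     current = [[]]
--     d = 0
--     for count in num_hidden_layer_list:
--         if count < 1:
--             continue
--         if count > len(hidden_sizes_list):
--             break
--         while d < count:
--             sizes = hidden_sizes_list[d]
--             current = [r + [x] for r in current for x in sizes]
--             d += 1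
--         result += [list(r) for r in current]
--     return result
-- ===== Notes on version B (the rewrite author's own statement) =====
-- stated objective: alternative
-- what changed: Instead of recomputing itertools.product of the whole prefix for each layer count, B makes one incremental pass that extends a single shared prefix product depth-by-depth and reuses it across the sorted (non-decreasing) counts.
import Mathlib
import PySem

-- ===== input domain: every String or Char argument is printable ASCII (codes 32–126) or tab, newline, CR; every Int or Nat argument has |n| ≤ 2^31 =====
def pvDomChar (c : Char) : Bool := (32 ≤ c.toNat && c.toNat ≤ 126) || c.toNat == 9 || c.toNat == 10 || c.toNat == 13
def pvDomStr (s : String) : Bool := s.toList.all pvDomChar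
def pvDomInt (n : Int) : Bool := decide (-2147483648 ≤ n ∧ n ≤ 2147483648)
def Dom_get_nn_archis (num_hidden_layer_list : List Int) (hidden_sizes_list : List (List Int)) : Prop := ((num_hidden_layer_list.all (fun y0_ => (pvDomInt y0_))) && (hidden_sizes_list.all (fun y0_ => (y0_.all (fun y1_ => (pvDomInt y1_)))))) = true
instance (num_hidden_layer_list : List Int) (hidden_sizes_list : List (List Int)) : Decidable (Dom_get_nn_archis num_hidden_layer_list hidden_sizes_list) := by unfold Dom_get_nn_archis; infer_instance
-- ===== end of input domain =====

-- B replaces per-count itertools.product recomputation by one incremental pass reusing a shared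
-- prefix product (objective: alternative). Both A and B sort num_hidden_layer_list in place in
-- Python; the equivalence proved here is about the return value.

-- ===== PORT A =====
-- itertools.product(*pools): fold extending every tuple by each element of the next pool
-- (rightmost factor varies fastest) — exact for itertools.product.
def pyProduct (pools : List (List Int)) : List (List Int) :=
  pools.foldl (fun acc pool => acc.flatMap (fun r => pool.map (fun x => r ++ [x]))) [[]]

-- the for-loop of A: accumulator = hidden_sizes_allComb; 'break' returns the accumulator.
-- hidden_sizes_list[:c] with 0 ≤ c is List.take c.toNat (exact for a nonneg in-range slice).
def aLoop (hs : List (List Int)) : List Int → List (List Int) → List (List Int)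
  | [], acc => acc
  | c :: rest, acc =>
    if c < 1 then aLoop hs rest acc
    else if c > (hs.length : Int) then acc
    else aLoop hs rest (acc ++ pyProduct (hs.take c.toNat))

-- final list(map(list, …)) is the identity under the List-of-List typing.
def get_nn_archis (num_hidden_layer_list : List Int) (hidden_sizes_list : List (List Int)) : List (List Int) :=
  aLoop hidden_sizes_list (PySem.List.sorted num_hidden_layer_list (fun x => x) false) []

-- ===== PORT B =====
-- one depth step: current = [r + [x] for r in current for x in sizes]
def extendStep (sizes : List Int) (current : List (List Int)) : List (List Int) :=
  current.flatMap (fun r => sizes.map (fun x => r ++ [x]))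

-- the 'while d < count' loop; hidden_sizes_list[d] with d < len is getD d [] (in range, exact).
def extendTo (hs : List (List Int)) (current : List (List Int)) (d c : Nat) : List (List Int) :=
  if d < c then extendTo hs (extendStep (hs.getD d []) current) (d + 1) c else current
termination_by c - d

-- the for-loop of B: result built front-to-back; 'break' ends with no further output.
def bLoop (hs : List (List Int)) : List Int → List (List Int) → Nat → List (List Int)
  | [], _, _ => []
  | c :: rest, current, d =>
    if c < 1 then bLoop hs rest current d
    else if c > (hs.length : Int) then []
    else
      let cur' := extendTo hs current d c.toNat
      cur'.map (fun r => r) ++ bLoop hs rest cur' c.toNat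

def get_nn_archis_alt (num_hidden_layer_list : List Int) (hidden_sizes_list : List (List Int)) : List (List Int) :=
  bLoop hidden_sizes_list (PySem.List.sorted num_hidden_layer_list (fun x => x) false) [[]] 0

-- ===== PRECONDITION & SPEC =====
def Spec_get_nn_archis (num_hidden_layer_list : List Int) (hidden_sizes_list : List (List Int)) (out : List (List Int)) : Prop := out = get_nn_archis_alt num_hidden_layer_list hidden_sizes_list
instance (num_hidden_layer_list : List Int) (hidden_sizes_list : List (List Int)) (out : List (List Int)) : Decidable (Spec_get_nn_archis num_hidden_layer_list hidden_sizes_list out) := by unfold Spec_get_nn_archis; infer_instance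

-- ===== CLAIM (what is proved, stated in full; the proofs are below) =====
def Claim_equal_get_nn_archis : Prop := ∀ (num_hidden_layer_list : List Int) (hidden_sizes_list : List (List Int)), Dom_get_nn_archis num_hidden_layer_list hidden_sizes_list → Spec_get_nn_archis num_hidden_layer_list hidden_sizes_list (get_nn_archis num_hidden_layer_list hidden_sizes_list)

-- ===== LEMMAS AND PROOFS =====

-- A's accumulator shifts out of the loop
theorem aLoop_acc (hs : List (List Int)) (l : List Int) (acc : List (List Int)) :
    aLoop hs l acc = acc ++ aLoop hs l [] := by
  induction l generalizing acc with
  | nil => simp [aLoop]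
  | cons c rest ih =>
    simp only [aLoop]
    split_ifs with h1 h2
    · exact ih acc
    · simp
    · rw [ih (acc ++ _), ih ([] ++ _)]; simp

-- extending the prefix product of depth d up to depth c gives the prefix product of depth c
theorem extendTo_prod (hs : List (List Int)) (d c : Nat) (hdc : d ≤ c) (hc : c ≤ hs.length) :
    extendTo hs (pyProduct (hs.take d)) d c = pyProduct (hs.take c) := by
  induction hn : c - d generalizing d with
  | zero =>
    have : d = c := by omega
    subst this
    rw [extendTo]; simp
  | succ n ih =>
    have hd : d < c := by omega
    have hdl : d < hs.length := by omega
    rw [extendTo]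
    simp only [hd, if_pos]
    have hget : hs[d]? = some hs[d] := List.getElem?_eq_getElem hdl
    have htake : hs.take (d + 1) = hs.take d ++ [hs[d]] := by
      rw [List.take_succ, hget]; rfl
    have hstep : extendStep (hs.getD d []) (pyProduct (hs.take d)) = pyProduct (hs.take (d + 1)) := by
      unfold pyProduct
      rw [htake, List.foldl_append]
      simp [extendStep, List.getD, hget]
    rw [hstep]
    exact ih (d + 1) (by omega) (by omega)

-- loop equivalence on a non-decreasing count list, with the shared product at depth d
theorem loop_eq (hs : List (List Int)) (l : List Int) (hsorted : l.Pairwise (· ≤ ·))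
    (d : Nat) (hd : d ≤ hs.length) (hlb : ∀ c ∈ l, 1 ≤ c → (d : Int) ≤ c) :
    bLoop hs l (pyProduct (hs.take d)) d = aLoop hs l [] := by
  induction l generalizing d with
  | nil => simp [aLoop, bLoop]
  | cons c rest ih =>
    have hhead := List.pairwise_cons.mp hsorted
    simp only [aLoop, bLoop]
    split_ifs with h1 h2
    · exact ih hhead.2 d hd (fun c' hc' h1' => hlb c' (List.mem_cons_of_mem _ hc') h1')
    · rfl
    · replace h1 : 1 ≤ c := by omega
      replace h2 : c ≤ (hs.length : Int) := by omega
      have hdc : d ≤ c.toNat := by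
        have := hlb c (List.mem_cons_self) h1
        omega
      have hcl : c.toNat ≤ hs.length := by omega
      rw [extendTo_prod hs d c.toNat hdc hcl, aLoop_acc]
      simp only [List.nil_append, List.map_id_fun', id]
      rw [ih hhead.2 c.toNat hcl (fun c' hc' h1' => by
          have := hhead.1 c' hc'
          omega)]

-- ===== VERDICT (by name: the statement is the Claim_ definition above) =====
theorem get_nn_archis_spec : Claim_equal_get_nn_archis := by
  intro nl hs _
  unfold Spec_get_nn_archis get_nn_archis get_nn_archis_alt
  have hs' := PySem.List.sorted_pairwise nl (fun x => x) (κ := Int)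
  rw [← loop_eq hs _ hs' 0 (Nat.zero_le _) (fun c _ h1 => by omega)]
  simp [pyProduct]
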